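-- pv_equiv track=rewrite | github.com/anagvillanueva/Compiladores | compilador.py | tokeniza
-- ===== SOURCE A (Python) =====
-- def esSeparador(caracter):
--     return caracter in " \n\t"
--
-- def esSimboloEsp(caracter):
--     return caracter in "+-*;,.:!=%&/()[]{}<><=>=:="
--
-- def tokeniza(cad):
--     tokens = []
--     dentro = False
--     token = ""
--     for c in cad:
--         if dentro: #esta dentro del token
--             if esSeparador(c):
--                 tokens.append(token)
--                 token = ""
--                 dentro = False
--             elif esSimboloEsp(c):
--                 tokens.append(token)
--                 tokens.append(c)
--                 token = ""
--                 dentro = False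
--             else:
--                 token = token + c
--         else:
--             if esSimboloEsp(c):
--                 tokens.append(c)
--             elif esSeparador(c):
--                 a=0
--             else:
--                 dentro = True
--                 token = c
--     if token != '':
--        tokens.append(token)
--     return tokens
-- ===== SOURCE B (Python) =====
-- def tokeniza(cad):
--     esp = "+-*;,.:!=%&/()[]{}<>"
--     sep = " \n\t"
--     padded = "".join(" " + c + " " if c in esp else (" " if c in sep else c) for c in cad)
--     return [t for t in padded.split(" ") if t]
-- ===== Notes on version B (the rewrite author's own statement) =====
-- stated objective: simpler
-- what changed: Replaces A's two-state (inside/outside token) character state machine with a stateless transform: pad each special symbol with spaces, map separators to a space, then split on spaces and drop empty pieces.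
import Mathlib
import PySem

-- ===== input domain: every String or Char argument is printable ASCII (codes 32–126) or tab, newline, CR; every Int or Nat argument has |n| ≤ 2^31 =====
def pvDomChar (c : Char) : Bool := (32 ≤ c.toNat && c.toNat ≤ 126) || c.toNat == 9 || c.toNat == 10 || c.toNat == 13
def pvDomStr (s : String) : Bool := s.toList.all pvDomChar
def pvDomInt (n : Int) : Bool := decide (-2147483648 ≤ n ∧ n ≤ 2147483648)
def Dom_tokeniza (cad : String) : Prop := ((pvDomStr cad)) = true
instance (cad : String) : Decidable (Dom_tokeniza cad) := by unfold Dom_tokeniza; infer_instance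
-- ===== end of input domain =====

-- B replaces A's boolean state machine by padding special symbols with spaces, mapping
-- separators to spaces, and splitting on ' ' (objective: simpler, same O(n) cost).

-- ===== PORT A =====
-- 'c in s' for a single character is membership in the string's characters (exact here)
def esSeparador (c : Char) : Bool := (" \n\t".toList).contains c

def esSimboloEsp (c : Char) : Bool := ("+-*;,.:!=%&/()[]{}<><=>=:=".toList).contains c

def tokStep (st : List String × Bool × List Char) (c : Char) : List String × Bool × List Char :=
  match st with
  | (tokens, dentro, token) =>
    if dentro then
      if esSeparador c then (tokens ++ [String.mk token], false, [])
      else if esSimboloEsp c then (tokens ++ [String.mk token, String.mk [c]], false, [])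
      else (tokens, true, token ++ [c])
    else
      if esSimboloEsp c then (tokens ++ [String.mk [c]], false, token)
      else if esSeparador c then (tokens, false, token)
      else (tokens, true, [c])

def tokeniza (cad : String) : List String :=
  match cad.toList.foldl tokStep ([], false, []) with
  | (tokens, _, token) => if token ≠ [] then tokens ++ [String.mk token] else tokens

-- ===== PORT B =====
def padChar (c : Char) : List Char :=
  if ("+-*;,.:!=%&/()[]{}<>".toList).contains c then [' ', c, ' ']
  else if (" \n\t".toList).contains c then [' ']
  else [c]

def tokeniza_alt (cad : String) : List String :=
  ((PySem.Chars.splitOn (cad.toList.flatMap padChar) [' ']).filter (· ≠ [])).map String.mk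

-- ===== PRECONDITION & SPEC =====
def Spec_tokeniza (cad : String) (out : List String) : Prop := out = tokeniza_alt cad
instance (cad : String) (out : List String) : Decidable (Spec_tokeniza cad out) := by unfold Spec_tokeniza; infer_instance

-- ===== CLAIM (what is proved, stated in full; the proofs are below) =====
def Claim_equal_tokeniza : Prop := ∀ (cad : String), Dom_tokeniza cad → Spec_tokeniza cad (tokeniza cad)

-- ===== LEMMAS AND PROOFS =====
-- reference split-on-one-space, structural recursion (cur is the current word reversed)
def pvSplit : List Char → List Char → List (List Char)
  | [], cur => [cur.reverse]
  | c :: rest, cur => if c = ' ' then cur.reverse :: pvSplit rest [] else pvSplit rest (c :: cur)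

lemma go_eq (fuel : Nat) : ∀ (s cur : List Char) (acc : List (List Char)),
    s.length < fuel →
    PySem.Chars.splitOn.go [' '] fuel s cur acc = acc.reverse ++ pvSplit s cur := by
  induction fuel with
  | zero => intro s cur acc h; omega
  | succ n ih =>
    intro s cur acc h
    cases s with
    | nil => simp [PySem.Chars.splitOn.go, pvSplit]
    | cons c rest =>
      by_cases hc : c = ' '
      · subst hc
        simp [PySem.Chars.splitOn.go, pvSplit, List.isPrefixOf, ih rest [] _ (by simpa using Nat.lt_of_succ_lt_succ h)]
      · simp [PySem.Chars.splitOn.go, pvSplit, List.isPrefixOf, hc, Ne.symm hc,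
          ih rest (c :: cur) _ (by simpa using Nat.lt_of_succ_lt_succ h)]

lemma splitOn_eq (s : List Char) : PySem.Chars.splitOn s [' '] = pvSplit s [] := by
  simpa using go_eq (s.length + 1) s [] [] (Nat.lt_succ_self _)

lemma esp_eq (c : Char) : esSimboloEsp c = ("+-*;,.:!=%&/()[]{}<>".toList).contains c := by
  rw [Bool.eq_iff_iff]
  simp [esSimboloEsp]
  tauto

lemma main_lemma : ∀ (cs : List Char) (tokens : List String) (token : List Char),
    (match List.foldl tokStep (tokens, decide (token ≠ []), token) cs with
     | (ts, _, tk) => if tk ≠ [] then ts ++ [String.mk tk] else ts)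
    = tokens ++ ((pvSplit (cs.flatMap padChar) token.reverse).filter (· ≠ [])).map String.mk := by
  intro cs
  induction cs with
  | nil =>
    intro tokens token
    by_cases h : token = []
    · subst h; simp [pvSplit]
    · simp [pvSplit, h]
  | cons c rest ih =>
    intro tokens token
    rw [List.flatMap_cons, List.foldl_cons]
    by_cases hesp : esSimboloEsp c = true
    · have hesp' : ("+-*;,.:!=%&/()[]{}<>".toList).contains c = true := (esp_eq c) ▸ hesp
      have hc : c ≠ ' ' := by rintro rfl; exact absurd hesp' (by decide)
      have hsep : esSeparador c = false := by
        cases hse : esSeparador c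
        · rfl
        · exfalso
          simp [esSeparador] at hse
          rcases hse with rfl | rfl | rfl <;> exact absurd hesp (by decide)
      have hpad : padChar c = [' ', c, ' '] := by rw [padChar, if_pos hesp']
      by_cases h : token = []
      · subst h
        rw [show tokStep (tokens, decide (([] : List Char) ≠ []), ([] : List Char)) c = ((tokens ++ [String.mk [c]]), decide (([] : List Char) ≠ []), ([] : List Char)) from by
          simp [tokStep, hesp]]
        rw [ih]
        rw [hpad]
        rw [show ((([' ', c, ' '] : List Char) ++ rest.flatMap padChar)) = ' ' :: c :: ' ' :: rest.flatMap padChar from rfl]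
        simp [pvSplit, hc]
      · rw [show (tokens, decide (token ≠ []), token) = (tokens, true, token) from by simp [h]]
        rw [show tokStep (tokens, true, token) c = ((tokens ++ [String.mk token, String.mk [c]]), decide (([] : List Char) ≠ []), ([] : List Char)) from by
          simp [tokStep, hesp, hsep]]
        rw [ih]
        rw [hpad]
        rw [show ((([' ', c, ' '] : List Char) ++ rest.flatMap padChar)) = ' ' :: c :: ' ' :: rest.flatMap padChar from rfl]
        simp [pvSplit, hc, h]
    · by_cases hsep : esSeparador c = true
      · have hespc : ("+-*;,.:!=%&/()[]{}<>".toList).contains c = false :=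
          (esp_eq c) ▸ (Bool.not_eq_true _ ▸ (by simpa using hesp))
        have hsep' : ((" \n\t".toList).contains c) = true := hsep
        have hpad : padChar c = [' '] := by
          rw [padChar, if_neg (by rw [hespc]; decide), if_pos hsep']
        by_cases h : token = []
        · subst h
          rw [show tokStep (tokens, decide (([] : List Char) ≠ []), ([] : List Char)) c = (tokens, decide (([] : List Char) ≠ []), ([] : List Char)) from by
            simp [tokStep, hesp, hsep]]
          rw [ih]
          rw [hpad]
          rw [show ((([' '] : List Char) ++ rest.flatMap padChar)) = ' ' :: rest.flatMap padChar from rfl]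
          simp [pvSplit]
        · rw [show (tokens, decide (token ≠ []), token) = (tokens, true, token) from by simp [h]]
          rw [show tokStep (tokens, true, token) c = ((tokens ++ [String.mk token]), decide (([] : List Char) ≠ []), ([] : List Char)) from by
            simp [tokStep, hsep]]
          rw [ih]
          rw [hpad]
          rw [show ((([' '] : List Char) ++ rest.flatMap padChar)) = ' ' :: rest.flatMap padChar from rfl]
          simp [pvSplit, h]
      · have hespc : ("+-*;,.:!=%&/()[]{}<>".toList).contains c = false :=
          (esp_eq c) ▸ (Bool.not_eq_true _ ▸ (by simpa using hesp))
        have hc : c ≠ ' ' := by rintro rfl; exact hsep (by decide)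
        have hsep' : ((" \n\t".toList).contains c) = false := by
          simpa [esSeparador] using hsep
        have hpad : padChar c = [c] := by
          rw [padChar, if_neg (by rw [hespc]; decide), if_neg (by rw [hsep']; decide)]
        by_cases h : token = []
        · subst h
          rw [show tokStep (tokens, decide (([] : List Char) ≠ []), ([] : List Char)) c = (tokens, decide (([c] : List Char) ≠ []), ([c] : List Char)) from by
            simp [tokStep, hesp, hsep]]
          rw [ih]
          rw [hpad]
          rw [show ((([c] : List Char) ++ rest.flatMap padChar)) = c :: rest.flatMap padChar from rfl]
          simp [pvSplit, hc]
        · rw [show (tokens, decide (token ≠ []), token) = (tokens, true, token) from by simp [h]]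
          rw [show tokStep (tokens, true, token) c = (tokens, decide ((token ++ [c]) ≠ []), token ++ [c]) from by
            simp [tokStep, hesp, hsep]]
          rw [ih]
          rw [hpad]
          rw [show ((([c] : List Char) ++ rest.flatMap padChar)) = c :: rest.flatMap padChar from rfl]
          simp [pvSplit, hc]

-- ===== VERDICT (by name: the statement is the Claim_ definition above) =====
theorem tokeniza_spec : Claim_equal_tokeniza := by
  intro cad _
  unfold Spec_tokeniza tokeniza tokeniza_alt
  rw [splitOn_eq]
  simpa using main_lemma cad.toList [] []
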